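-- pv_equiv track=rewrite | github.com/ianepreston/scratch | advent_2017/day_01/reverse_captcha.py | circular_sum_sequel
-- ===== SOURCE A (Python) =====
-- def circular_sum_sequel(num_list):
--     circular_sum = 0
--     list_len = len(num_list)
--     assert list_len % 2 == 0
--     mid_len = int(list_len / 2)
--     for index, num in enumerate(num_list):
--         if index + mid_len >= list_len:
--             pointer = index + mid_len - list_len
--         else:
--             pointer = index + mid_len
--         if num == num_list[pointer]:
--             circular_sum += num
--     return circular_sum
-- ===== SOURCE B (Python) =====
-- def circular_sum_sequel(num_list):
--     # Pair symmetry: element i matches element i+mid iff i+mid matches i,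
--     # so one half-pass counting each matching pair twice gives the same sum.
--     list_len = len(num_list)
--     assert list_len % 2 == 0
--     mid = list_len // 2
--     total = 0
--     for i in range(mid):
--         if num_list[i] == num_list[i + mid]:
--             total += 2 * num_list[i]
--     return total
-- ===== Notes on version B (the rewrite author's own statement) =====
-- stated objective: simpler
-- what changed: Replaces the full-length pass with a wraparound-pointer branch by a half-length pass over symmetric pairs, adding 2*num_list[i] when num_list[i] == num_list[i+mid].
import Mathlib
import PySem

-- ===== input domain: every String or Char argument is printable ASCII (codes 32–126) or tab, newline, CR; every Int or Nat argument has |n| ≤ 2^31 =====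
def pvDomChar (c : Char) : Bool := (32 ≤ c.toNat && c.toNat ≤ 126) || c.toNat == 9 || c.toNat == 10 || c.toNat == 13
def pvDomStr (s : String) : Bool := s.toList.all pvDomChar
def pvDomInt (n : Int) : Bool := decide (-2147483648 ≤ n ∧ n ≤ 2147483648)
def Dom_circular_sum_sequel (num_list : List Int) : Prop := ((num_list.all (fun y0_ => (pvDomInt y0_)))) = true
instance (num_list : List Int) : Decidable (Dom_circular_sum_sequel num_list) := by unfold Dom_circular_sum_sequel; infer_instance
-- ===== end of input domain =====

-- B replaces A's full-length pass with wraparound pointer by a half-length pass over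
-- symmetric pairs, adding 2*num_list[i] on a match (objective: simpler).


-- ===== PORT A =====
-- literal transliteration of A; the index into num_list[pointer] is always in range
-- (0 ≤ pointer < len), so pyGetD's default 0 is never used; int(list_len/2) is exact
-- floor division here (list_len ≥ 0), ported as PySem.Int.floordiv.
def circular_sum_sequel (num_list : List Int) : Int :=
  let list_len : Int := num_list.length
  let mid_len : Int := PySem.Int.floordiv list_len 2
  (PySem.List.enumerate num_list 0).foldl
    (fun circular_sum p =>
      let pointer : Int :=
        if p.1 + mid_len ≥ list_len then p.1 + mid_len - list_len else p.1 + mid_len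
      if p.2 = PySem.List.pyGetD num_list pointer 0 then circular_sum + p.2 else circular_sum)
    0

-- ===== PORT B =====
-- transliteration of Source B: half-length pass, indices i and i+mid always in range.
def circular_sum_sequel_alt (num_list : List Int) : Int :=
  let mid : Nat := num_list.length / 2
  (List.range mid).foldl
    (fun total i =>
      if num_list.getD i 0 = num_list.getD (i + mid) 0 then total + 2 * num_list.getD i 0
      else total)
    0

-- ===== PRECONDITION & SPEC =====
-- A asserts an even length: on odd-length lists Python raises AssertionError.
def Pre_circular_sum_sequel (num_list : List Int) : Prop := num_list.length % 2 = 0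
instance (num_list : List Int) : Decidable (Pre_circular_sum_sequel num_list) := by
  unfold Pre_circular_sum_sequel; infer_instance
def pvWitness_circular_sum_sequel : List Int := [1, 2, 1, 3]

def Spec_circular_sum_sequel (num_list : List Int) (out : Int) : Prop := out = circular_sum_sequel_alt num_list
instance (num_list : List Int) (out : Int) : Decidable (Spec_circular_sum_sequel num_list out) := by unfold Spec_circular_sum_sequel; infer_instance

-- ===== CLAIM (what is proved, stated in full; the proofs are below) =====
def Claim_equal_circular_sum_sequel : Prop := ∀ (num_list : List Int), Dom_circular_sum_sequel num_list → Pre_circular_sum_sequel num_list → Spec_circular_sum_sequel num_list (circular_sum_sequel num_list)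

-- ===== LEMMAS AND PROOFS =====

-- an accumulation foldl whose step adds a per-element term is the sum of those terms
theorem foldl_step_add {α : Type} (l : List α) (f : Int → α → Int) (t : α → Int)
    (hf : ∀ acc x, f acc x = acc + t x) (a : Int) :
    l.foldl f a = a + (l.map t).sum := by
  induction l generalizing a with
  | nil => simp
  | cons x xs ih =>
    simp only [List.foldl_cons, List.map_cons, List.sum_cons, ih, hf]
    ring

theorem sum_map_add_sum_map {α : Type} (l : List α) (f g : α → Int) :
    (l.map f).sum + (l.map g).sum = (l.map (fun x => f x + g x)).sum := by
  induction l with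
  | nil => simp
  | cons x xs ih => simp only [List.map_cons, List.sum_cons]; omega

theorem circular_sum_sequel_spec_aux (xs : List Int) (m : Nat) (h : xs.length = m + m) :
    circular_sum_sequel xs = circular_sum_sequel_alt xs := by
  unfold circular_sum_sequel circular_sum_sequel_alt
  have hmid : PySem.Int.floordiv (xs.length : Int) 2 = ((xs.length / 2 : Nat) : Int) := by
    exact_mod_cast PySem.Int.floordiv_natCast xs.length 2
  have hm2 : xs.length / 2 = m := by omega
  simp only [hmid, hm2]
  rw [PySem.List.enumerate_eq_map_pyRange (d := 0)]
  rw [foldl_step_add _ _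
        (fun p => if p.2 = PySem.List.pyGetD xs
          (if p.1 + (m:Int) ≥ ((xs.length:Int)) then p.1 + (m:Int) - (xs.length:Int)
           else p.1 + (m:Int)) 0 then p.2 else 0)
        (by
          intro acc x
          by_cases hc : x.2 = PySem.List.pyGetD xs
            (if x.1 + (m:Int) ≥ ((xs.length:Int)) then x.1 + (m:Int) - (xs.length:Int)
             else x.1 + (m:Int)) 0
          · simp only [if_pos hc]
          · simp only [if_neg hc, add_zero]) 0]
  rw [foldl_step_add _ _
        (fun i => if xs.getD i 0 = xs.getD (i + m) 0 then 2 * xs.getD i 0 else 0)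
        (by
          intro acc x
          by_cases hc : xs.getD x 0 = xs.getD (x + m) 0
          · simp only [if_pos hc]
          · simp only [if_neg hc, add_zero]) 0]
  simp only [zero_add, List.map_map, PySem.List.len_eq, PySem.List.pyRange_zero_natCast, h]
  rw [List.range_add, List.map_append, List.sum_append, List.map_map]
  rw [sum_map_add_sum_map]
  refine congrArg List.sum (List.map_congr_left ?_)
  intro i hi
  have him : i < m := List.mem_range.mp hi
  have h1 : ¬ (((i:Nat):Int) + (m:Int) ≥ ((m + m : Nat) : Int)) := by push_cast; omega
  have h2 : ((m + i : Nat):Int) + (m:Int) ≥ ((m + m : Nat) : Int) := by push_cast; omega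
  simp only [Function.comp, if_pos h2, if_neg h1]
  have e1 : (((i:Nat):Int) + (m:Int)) = (((i + m : Nat)):Int) := by push_cast; ring
  have e2 : ((m + i : Nat):Int) + (m:Int) - ((m + m : Nat):Int) = ((i:Nat):Int) := by
    push_cast; ring
  rw [e1, e2]
  simp only [PySem.List.pyGetD_natCast]
  have hcomm : xs.getD (m + i) 0 = xs.getD (i + m) 0 := by rw [Nat.add_comm]
  rw [hcomm]
  by_cases hc : xs.getD i 0 = xs.getD (i + m) 0
  · rw [if_pos hc, if_pos hc.symm, if_pos hc, ← hc]; ring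
  · rw [if_neg hc, if_neg (fun h' => hc h'.symm), if_neg hc]; ring

-- ===== VERDICT (by name: the statement is the Claim_ definition above) =====
theorem circular_sum_sequel_spec : Claim_equal_circular_sum_sequel := by
  intro xs _ hpre
  have ⟨m, hm⟩ : ∃ m, xs.length = m + m := ⟨xs.length / 2, by
    have := hpre; unfold Pre_circular_sum_sequel at this; omega⟩
  exact circular_sum_sequel_spec_aux xs m hm
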